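-- pv_equiv track=rewrite | github.com/djccnt15/maths | linalg.py | mat_diag
-- ===== SOURCE A (Python) =====
-- def diag_ele(a):
--     n = len(a)
--     d = []
--
--     for i in range(n):
--         d.append(a[i][i])
--
--     return d
--
-- def mat_diag(a):
--     d = diag_ele(a)
--     n = len(d)
--     D = []
--
--     for i in range(n):
--         row = []
--         for j in range(n):
--             if i == j:
--                 row.append(d[i])
--             else:
--                 row.append(0)
--         D.append(row)
--
--     return D
-- ===== SOURCE B (Python) =====
-- def mat_diag(a):
--     def build(d):
--         if not d:
--             return []
--         return [[d[0]] + [0] * (len(d) - 1)] + [[0] + row for row in build(d[1:])]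
--     return build([row[i] for i, row in enumerate(a)])
-- ===== Notes on version B (the rewrite author's own statement) =====
-- stated objective: alternative
-- what changed: Replaces the index-driven nested loops with an i==j test by structural recursion on the diagonal list: each step emits the first row ([d0] plus zeros) and prefixes a zero column onto the recursively built (n-1)x(n-1) diagonal submatrix; no indices or equality tests remain.
import Mathlib
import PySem

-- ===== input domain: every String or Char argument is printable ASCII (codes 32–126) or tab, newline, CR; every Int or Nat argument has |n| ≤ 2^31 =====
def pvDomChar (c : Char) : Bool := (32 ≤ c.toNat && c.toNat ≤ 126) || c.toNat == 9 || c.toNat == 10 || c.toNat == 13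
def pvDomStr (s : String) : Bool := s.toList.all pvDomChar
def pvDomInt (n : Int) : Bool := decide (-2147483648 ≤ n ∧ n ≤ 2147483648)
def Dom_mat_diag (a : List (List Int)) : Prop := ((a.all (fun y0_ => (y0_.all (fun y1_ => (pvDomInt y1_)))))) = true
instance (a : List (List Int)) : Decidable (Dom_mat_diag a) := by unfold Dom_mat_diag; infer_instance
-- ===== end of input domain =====

-- B rebuilds the matrix by structural recursion on the diagonal list (block decomposition: first row + zero-column-prefixed submatrix), instead of A's index-driven nested loops; same cost.


-- ===== PORT A =====
def mat_diag_diag_ele (a : List (List Int)) : List Int :=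
  (List.range a.length).foldl
    (fun d (i : Nat) => d ++ [PySem.List.pyGetD (PySem.List.pyGetD a (i : Int) []) (i : Int) 0]) []

def mat_diag (a : List (List Int)) : List (List Int) :=
  let d := mat_diag_diag_ele a
  let n := d.length
  (List.range n).foldl
    (fun D (i : Nat) =>
      D ++ [(List.range n).foldl
        (fun row (j : Nat) => row ++ [if i = j then PySem.List.pyGetD d (i : Int) 0 else 0]) []]) []

-- ===== PORT B =====
-- build(d): [] if d empty; else first row [d0]+zeros, then 0-prefix every row of build(rest)
def mat_diag_build : List Int → List (List Int)
  | [] => []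
  | d :: ds => (d :: List.replicate ds.length (0 : Int)) :: (mat_diag_build ds).map (fun row => 0 :: row)

def mat_diag_alt (a : List (List Int)) : List (List Int) :=
  mat_diag_build ((PySem.List.enumerate a).map (fun p => PySem.List.pyGetD p.2 p.1 0))

-- ===== PRECONDITION & SPEC =====
-- Pre_ excludes exactly the inputs where some row i is too short (len(a[i]) ≤ i): there Python A raises IndexError.
def Pre_mat_diag (a : List (List Int)) : Prop := ∀ i, i < a.length → i < (a.getD i []).length
instance (a : List (List Int)) : Decidable (Pre_mat_diag a) := by unfold Pre_mat_diag; infer_instance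
def pvWitness_mat_diag : List (List Int) := [[1, 2], [3, 4]]
def Spec_mat_diag (a : List (List Int)) (out : List (List Int)) : Prop := out = mat_diag_alt a
instance (a : List (List Int)) (out : List (List Int)) : Decidable (Spec_mat_diag a out) := by unfold Spec_mat_diag; infer_instance

-- ===== CLAIM (what is proved, stated in full; the proofs are below) =====
def Claim_equal_mat_diag : Prop := ∀ (a : List (List Int)), Dom_mat_diag a → Pre_mat_diag a → Spec_mat_diag a (mat_diag a)

-- ===== LEMMAS AND PROOFS =====

-- the diagonal value both programs read at index i
def pvV (a : List (List Int)) (i : Nat) : Int :=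
  PySem.List.pyGetD (PySem.List.pyGetD a (i : Int) []) (i : Int) 0

lemma diag_ele_eq_map (a : List (List Int)) :
    mat_diag_diag_ele a = (List.range a.length).map (pvV a) := by
  unfold mat_diag_diag_ele pvV
  rw [PySem.List.foldl_append_singleton_eq_map, List.nil_append]

-- B's diagonal list equals A's
lemma alt_diag_eq_map (a : List (List Int)) :
    (PySem.List.enumerate a).map (fun p => PySem.List.pyGetD p.2 p.1 0) =
      (List.range a.length).map (pvV a) := by
  apply List.ext_getElem
  · simp [PySem.List.length_enumerate]
  · intro k hk hk'
    simp only [List.length_map, PySem.List.length_enumerate] at hk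
    simp only [List.getElem_map, List.getElem_range, PySem.List.getElem_enumerate]
    unfold pvV
    simp only [zero_add, PySem.List.pyGetD_natCast, List.getD_eq_getElem?_getD]
    simp [hk]

-- structural characterisation of B's recursion
lemma build_eq_map (d : List Int) :
    mat_diag_build d =
      (List.range d.length).map
        (fun i => (List.range d.length).map (fun j => if i = j then d.getD i 0 else 0)) := by
  induction d with
  | nil => simp [mat_diag_build]
  | cons x ds ih =>
    simp only [mat_diag_build, ih, List.length_cons, List.range_succ_eq_map,
      List.map_cons, List.map_map]
    refine List.cons_eq_cons.mpr ⟨?_, ?_⟩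
    · simp only [if_true, List.getD_cons_zero]
      congr 1
      apply List.ext_getElem
      · simp
      · intro j hj hj'
        simp [Function.comp]
    · apply List.map_congr_left
      intro i hi
      simp [Function.comp]

-- ===== VERDICT (by name: the statement is the Claim_ definition above) =====
theorem mat_diag_spec : Claim_equal_mat_diag := by
  intro a _ _
  show mat_diag a = mat_diag_alt a
  have hA : mat_diag a =
      (List.range (mat_diag_diag_ele a).length).foldl
        (fun D (i : Nat) =>
          D ++ [(List.range (mat_diag_diag_ele a).length).foldl
            (fun row (j : Nat) => row ++ [if i = j then
              PySem.List.pyGetD (mat_diag_diag_ele a) (i : Int) 0 else 0]) []]) [] := rfl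
  have hd : mat_diag_diag_ele a = (List.range a.length).map (pvV a) := diag_ele_eq_map a
  have hB : mat_diag_alt a = mat_diag_build ((List.range a.length).map (pvV a)) := by
    unfold mat_diag_alt; rw [alt_diag_eq_map]
  rw [hA, hB, build_eq_map, PySem.List.foldl_append_singleton_eq_map, List.nil_append]
  have hlen : (mat_diag_diag_ele a).length = a.length := by simp [hd]
  have hlen2 : ((List.range a.length).map (pvV a)).length = a.length := by simp
  rw [hlen, hlen2]
  apply List.map_congr_left
  intro i hi
  simp only [List.mem_range] at hi
  rw [PySem.List.foldl_append_singleton_eq_map, List.nil_append]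
  apply List.map_congr_left
  intro j hj
  congr 1
  rw [hd, PySem.List.pyGetD_natCast]
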